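-- pv_equiv track=rewrite | github.com/plohkoon/pysh | src/pysh.py | pipe_index_generator
-- ===== SOURCE A (Python) =====
-- def pipe_index_generator(arr: list[str]) -> tuple[int, int]:
--     start = 0
--     end = 0
--
--     for i in range(len(arr)):
--         if arr[i] == '|':
--             end = i
--             yield start, end
--             start = i + 1
--
--     yield start, len(arr)
-- ===== SOURCE B (Python) =====
-- def pipe_index_generator(arr: list[str]):
--     # Two-phase: build the table of separator positions, then derive the
--     # start/end boundary tables and zip them into the ranges.
--     pipes = [i for i, x in enumerate(arr) if x == '|']
--     starts = [0] + [p + 1 for p in pipes]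
--     ends = pipes + [len(arr)]
--     yield from zip(starts, ends)
-- ===== Notes on version B (the rewrite author's own statement) =====
-- stated objective: alternative
-- what changed: B first builds the table of pipe positions, then derives a starts table and an ends table and zips them into the ranges, instead of yielding pairs while scanning with a running start variable.
import Mathlib
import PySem

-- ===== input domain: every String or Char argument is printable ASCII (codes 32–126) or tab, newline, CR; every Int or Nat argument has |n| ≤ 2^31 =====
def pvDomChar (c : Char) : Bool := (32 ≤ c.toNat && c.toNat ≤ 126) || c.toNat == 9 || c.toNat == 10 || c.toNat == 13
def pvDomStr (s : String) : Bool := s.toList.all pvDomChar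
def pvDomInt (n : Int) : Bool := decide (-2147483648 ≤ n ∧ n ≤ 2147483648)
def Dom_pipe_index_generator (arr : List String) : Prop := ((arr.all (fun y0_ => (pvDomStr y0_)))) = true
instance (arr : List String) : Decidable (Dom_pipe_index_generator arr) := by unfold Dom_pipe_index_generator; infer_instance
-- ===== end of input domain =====

-- B builds the pipe-position table first and zips boundary tables; same output, same cost (objective: alternative).
-- A is a generator; equivalence is about the list of yielded pairs.

-- ===== PORT A =====
-- scan range(len(arr)) with running start, appending a pair at each '|'
-- (pyGetD is exact here: every i drawn from the range is in bounds)
def pipe_index_generator (arr : List String) : List (Int × Int) :=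
  let st := (PySem.List.pyRange 0 (arr.length : Int) 1).foldl
    (fun (st : Int × List (Int × Int)) i =>
      if PySem.List.pyGetD arr i "" == "|" then (i + 1, st.2 ++ [(st.1, i)]) else st)
    ((0 : Int), [])
  st.2 ++ [(st.1, (arr.length : Int))]

-- ===== PORT B =====
def pipe_index_generator_alt (arr : List String) : List (Int × Int) :=
  let pipes : List Int := ((PySem.List.enumerate arr 0).filter (fun p => p.2 == "|")).map (·.1)
  let starts : List Int := (0 : Int) :: pipes.map (· + 1)
  let ends : List Int := pipes ++ [(arr.length : Int)]
  starts.zip ends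

-- ===== PRECONDITION & SPEC =====
def Spec_pipe_index_generator (arr : List String) (out : List (Int × Int)) : Prop := out = pipe_index_generator_alt arr
instance (arr : List String) (out : List (Int × Int)) : Decidable (Spec_pipe_index_generator arr out) := by unfold Spec_pipe_index_generator; infer_instance

-- ===== CLAIM (what is proved, stated in full; the proofs are below) =====
def Claim_equal_pipe_index_generator : Prop := ∀ (arr : List String), Dom_pipe_index_generator arr → Spec_pipe_index_generator arr (pipe_index_generator arr)

-- ===== LEMMAS AND PROOFS =====

/-- Loop invariant: A's scan over any index/value list, started at `(s, acc)`,
produces exactly `acc` followed by B's zip of boundary tables. -/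
theorem pipe_key (L : List (Int × String)) (n : Int) :
    ∀ (s : Int) (acc : List (Int × Int)),
    (let st := L.foldl
        (fun (st : Int × List (Int × Int)) p =>
          if p.2 == "|" then (p.1 + 1, st.2 ++ [(st.1, p.1)]) else st) (s, acc)
     st.2 ++ [(st.1, n)])
    = acc ++ ((s :: ((L.filter (fun p => p.2 == "|")).map (·.1)).map (· + 1)).zip
              (((L.filter (fun p => p.2 == "|")).map (·.1)) ++ [n])) := by
  induction L with
  | nil => intro s acc; simp
  | cons hd tl ih =>
    intro s acc
    by_cases h : hd.2 == "|"
    · simp only [List.foldl_cons, List.filter_cons, h, if_pos, List.map_cons]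
      rw [ih (hd.1 + 1) (acc ++ [(s, hd.1)])]
      simp [List.cons_append, List.append_assoc]
    · simp only [List.foldl_cons, List.filter_cons, h]
      simpa using ih s acc

-- ===== VERDICT (by name: the statement is the Claim_ definition above) =====
theorem pipe_index_generator_spec : Claim_equal_pipe_index_generator := by
  intro arr _
  unfold Spec_pipe_index_generator pipe_index_generator pipe_index_generator_alt
  have h := pipe_key (PySem.List.enumerate arr 0) (arr.length : Int) 0 []
  simp only [PySem.List.enumerate_eq_map_pyRange (d := ""), List.foldl_map, List.filter_map,
      List.map_map, PySem.List.len_eq] at h ⊢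
  exact h
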